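-- pv_equiv track=rewrite | github.com/ashlesh-md/dsa | practice/graph/number_of_distinct_icelands.py | number_of_distinct_icelands
-- ===== SOURCE A (Python) =====
-- from collections import deque
--
-- def number_of_distinct_icelands(grid):
--     rows, cols = len(grid), len(grid[0])
--     visited = set()
--     _deque = deque()
--     patterns = set()
--
--     def bfs(row, col):
--         current_pattern = []
--         while _deque:
--             current_row, current_col = _deque.popleft()
--             for direction in [(-1, 0), (0, +1), (+1, 0), (0, -1)]:
--                 nrow = current_row + direction[0]
--                 ncol = current_col + direction[1]
--                 if (
--                     0 <= nrow < rows
--                     and 0 <= ncol < cols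
--                     and grid[nrow][ncol] == 1
--                     and (nrow, ncol) not in visited
--                 ):
--                     _deque.append((nrow, ncol))
--                     current_pattern.append((nrow - row, ncol - col))
--                     visited.add((nrow, ncol))
--         return tuple(current_pattern)
--
--     for i in range(rows):
--         for j in range(cols):
--             if (i, j) not in visited and grid[i][j] == 1:
--                 _deque.append((i, j))
--                 patterns.add(bfs(i, j))
--
--     return len(patterns)
-- ===== SOURCE B (Python) =====
-- def number_of_distinct_icelands(grid):
--     rows, cols = len(grid), len(grid[0])
--     seen = set()
--     shapes = set()
--
--     def region_of(si, sj):
--         # grow {seed} to its fixpoint under land-neighbour dilation: the whole island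
--         region = {(si, sj)}
--         while True:
--             grown = {(r + dr, c + dc)
--                      for r, c in region
--                      for dr, dc in ((-1, 0), (0, 1), (1, 0), (0, -1))
--                      if 0 <= r + dr < rows and 0 <= c + dc < cols
--                      and grid[r + dr][c + dc] == 1} - region
--             if not grown:
--                 return region
--             region |= grown
--
--     for i in range(rows):
--         for j in range(cols):
--             if (i, j) not in seen and grid[i][j] == 1:
--                 region = region_of(i, j)
--                 seen |= region
--                 shapes.add(tuple(sorted((r - i, c - j) for r, c in region)))
--     return len(shapes)
-- ===== Notes on version B (the rewrite author's own statement) =====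
-- stated objective: alternative
-- what changed: Replaces the deque BFS flood fill with order-sensitive traversal signatures by a per-island fixpoint dilation (repeatedly expanding the region set by all land neighbours, no queue and no per-cell visit order) plus a canonical signature: the sorted tuple of seed-relative offsets of the whole region.
import Mathlib
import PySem

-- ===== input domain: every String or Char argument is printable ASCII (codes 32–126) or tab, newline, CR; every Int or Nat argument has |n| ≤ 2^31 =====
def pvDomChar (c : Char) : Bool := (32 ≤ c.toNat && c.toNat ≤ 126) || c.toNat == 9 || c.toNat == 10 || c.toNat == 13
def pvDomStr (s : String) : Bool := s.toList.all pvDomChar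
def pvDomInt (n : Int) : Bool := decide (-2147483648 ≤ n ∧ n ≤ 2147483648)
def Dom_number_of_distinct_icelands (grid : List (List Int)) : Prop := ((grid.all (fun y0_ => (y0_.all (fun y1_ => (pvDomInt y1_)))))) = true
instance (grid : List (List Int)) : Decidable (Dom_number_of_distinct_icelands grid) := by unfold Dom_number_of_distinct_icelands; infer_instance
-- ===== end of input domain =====

-- B replaces A's deque BFS flood fill (order-sensitive traversal signature) by a per-island
-- fixpoint dilation of the region set plus a canonical sorted-offset signature
-- (objective: alternative, same count proved, no speed claim).

-- ===== PORT A =====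

-- grid[r][c] (shared by both ports); total with default 0 — under Pre_ every access the
-- guards admit is in range, so the default is never taken there.
def pvCell (grid : List (List Int)) (r c : Int) : Int :=
  (PySem.List.pyGet? ((PySem.List.pyGet? grid r).getD []) c).getD 0

-- the literal direction list [(-1, 0), (0, +1), (+1, 0), (0, -1)]
def pvDirsA : List (Int × Int) := [(-1, 0), (0, 1), (1, 0), (0, -1)]

-- one iteration of A's `for direction in …` body; state = (queue after popleft, visited, current_pattern)
def pvStepA (rows cols : Int) (grid : List (List Int)) (row col cr cc : Int)
    (st : List (Int × Int) × PySem.Set (Int × Int) × List (Int × Int)) (d : Int × Int) :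
    List (Int × Int) × PySem.Set (Int × Int) × List (Int × Int) :=
  let nrow := cr + d.1
  let ncol := cc + d.2
  if 0 ≤ nrow ∧ nrow < rows ∧ 0 ≤ ncol ∧ ncol < cols ∧ pvCell grid nrow ncol = 1 ∧
      PySem.Set.contains st.2.1 (nrow, ncol) = false then
    (st.1 ++ [(nrow, ncol)], PySem.Set.add st.2.1 (nrow, ncol), st.2.2 ++ [(nrow - row, ncol - col)])
  else st

-- A's `while _deque:` loop; fuel is a totality guard only (one unit per popleft; the chosen
-- fuel rows*cols+1 bounds the number of enqueues, so the 0 case is never reached).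
-- Returns (current_pattern, visited).
def pvBfsA (rows cols : Int) (grid : List (List Int)) (row col : Int) :
    Nat → List (Int × Int) → PySem.Set (Int × Int) → List (Int × Int) →
    List (Int × Int) × PySem.Set (Int × Int)
  | 0, _, v, p => (p, v)
  | _ + 1, [], v, p => (p, v)
  | f + 1, (cr, cc) :: rest, v, p =>
    let st := pvDirsA.foldl (pvStepA rows cols grid row col cr cc) (rest, v, p)
    pvBfsA rows cols grid row col f st.1 st.2.1 st.2.2

def number_of_distinct_icelands (grid : List (List Int)) : Int :=
  let rows : Int := PySem.List.len grid
  let cols : Int := PySem.List.len ((PySem.List.pyGet? grid 0).getD [])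
  let fuel : Nat := grid.length * ((PySem.List.pyGet? grid 0).getD []).length + 1
  let res :=
    (PySem.List.pyRange 0 rows 1).foldl (fun st i =>
      (PySem.List.pyRange 0 cols 1).foldl (fun st j =>
        if PySem.Set.contains st.1 (i, j) = false ∧ pvCell grid i j = 1 then
          let r := pvBfsA rows cols grid i j fuel [(i, j)] st.1 []
          (r.2, PySem.Set.add st.2 r.1)
        else st) st)
      ((PySem.Set.empty : PySem.Set (Int × Int)), (PySem.Set.empty : PySem.Set (List (Int × Int))))
  PySem.Set.len res.2

-- ===== PORT B =====

-- Source B's direction tuple ((-1, 0), (0, 1), (1, 0), (0, -1))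
def pvDirsB : List (Int × Int) := [(-1, 0), (0, 1), (1, 0), (0, -1)]

-- Source B's guard `0 <= r+dr < rows and 0 <= c+dc < cols and grid[r+dr][c+dc] == 1`
def pvLandB (rows cols : Int) (grid : List (List Int)) (p : Int × Int) : Bool :=
  decide (0 ≤ p.1 ∧ p.1 < rows ∧ 0 ≤ p.2 ∧ p.2 < cols ∧ pvCell grid p.1 p.2 = 1)

-- Source B's `{(r+dr, c+dc) for … if …} - region` (hand port of the set comprehension:
-- candidates in region/direction order, deduplicated, then set difference; exact as a set)
def pvGrown (rows cols : Int) (grid : List (List Int)) (region : PySem.Set (Int × Int)) :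
    PySem.Set (Int × Int) :=
  PySem.Set.diff
    (PySem.Set.ofList
      ((region.flatMap (fun p => pvDirsB.map (fun d => (p.1 + d.1, p.2 + d.2)))).filter
        (pvLandB rows cols grid)))
    region

-- Source B's `while True:` dilation loop; fuel is a totality guard only (each round grows the
-- region by at least one cell of the rows×cols window, so rows*cols+1 rounds suffice).
def pvRegion (rows cols : Int) (grid : List (List Int)) :
    Nat → PySem.Set (Int × Int) → PySem.Set (Int × Int)
  | 0, region => region
  | f + 1, region =>
    let grown := pvGrown rows cols grid region
    if grown = [] then region else pvRegion rows cols grid f (PySem.Set.union region grown)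

-- Source B's `tuple(sorted((r - i, c - j) for r, c in region))`
def pvCanon (i j : Int) (region : PySem.Set (Int × Int)) : List (Int × Int) :=
  PySem.List.sorted2 (region.map (fun p => (p.1 - i, p.2 - j))) (fun o => o.1) (fun o => o.2) false

def number_of_distinct_icelands_alt (grid : List (List Int)) : Int :=
  let rows : Int := PySem.List.len grid
  let cols : Int := PySem.List.len ((PySem.List.pyGet? grid 0).getD [])
  let fuel : Nat := grid.length * ((PySem.List.pyGet? grid 0).getD []).length + 1
  let res :=
    (PySem.List.pyRange 0 rows 1).foldl (fun st i =>
      (PySem.List.pyRange 0 cols 1).foldl (fun st j =>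
        if PySem.Set.contains st.1 (i, j) = false ∧ pvCell grid i j = 1 then
          let region := pvRegion rows cols grid fuel (PySem.Set.add PySem.Set.empty (i, j))
          (PySem.Set.union st.1 region, PySem.Set.add st.2 (pvCanon i j region))
        else st) st)
      ((PySem.Set.empty : PySem.Set (Int × Int)), (PySem.Set.empty : PySem.Set (List (Int × Int))))
  PySem.Set.len res.2

-- ===== PRECONDITION & SPEC =====
-- Pre_ excludes exactly the inputs where Python A raises IndexError: the empty grid
-- (len(grid[0])) and ragged grids with a row shorter than the first row (grid[i][j]).
def Pre_number_of_distinct_icelands (grid : List (List Int)) : Prop :=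
  grid ≠ [] ∧ ∀ row ∈ grid, grid.headI.length ≤ row.length
instance (grid : List (List Int)) : Decidable (Pre_number_of_distinct_icelands grid) := by
  unfold Pre_number_of_distinct_icelands; infer_instance

def pvWitness_number_of_distinct_icelands : List (List Int) :=
  [[1, 1, 0], [0, 0, 1]]

def Spec_number_of_distinct_icelands (grid : List (List Int)) (out : Int) : Prop := out = number_of_distinct_icelands_alt grid
instance (grid : List (List Int)) (out : Int) : Decidable (Spec_number_of_distinct_icelands grid out) := by unfold Spec_number_of_distinct_icelands; infer_instance

-- ===== CLAIM (what is proved, stated in full; the proofs are below) =====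
def Claim_equal_number_of_distinct_icelands : Prop := ∀ (grid : List (List Int)), Dom_number_of_distinct_icelands grid → Pre_number_of_distinct_icelands grid → Spec_number_of_distinct_icelands grid (number_of_distinct_icelands grid)

-- ===== LEMMAS AND PROOFS =====

-- ---------- ghost notions: land cells, adjacency, connectivity ----------

def pvShift (si sj : Int) (o : Int × Int) : Int × Int := (si + o.1, sj + o.2)

def pvLand (rows cols : Int) (grid : List (List Int)) (p : Int × Int) : Prop :=
  0 ≤ p.1 ∧ p.1 < rows ∧ 0 ≤ p.2 ∧ p.2 < cols ∧ pvCell grid p.1 p.2 = 1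

def pvAdj (rows cols : Int) (grid : List (List Int)) (p q : Int × Int) : Prop :=
  pvLand rows cols grid p ∧ pvLand rows cols grid q ∧ (q.1 - p.1, q.2 - p.2) ∈ pvDirsA

def pvConn (rows cols : Int) (grid : List (List Int)) (p q : Int × Int) : Prop :=
  Relation.ReflTransGen (pvAdj rows cols grid) p q

-- offset-level adjacency inside an offset set S
def pvStepS (S : PySem.Set (Int × Int)) (p q : Int × Int) : Prop :=
  p ∈ S ∧ q ∈ S ∧ (q.1 - p.1, q.2 - p.2) ∈ pvDirsA

-- abstract replay of A's BFS on an offset set S (ghost; proofs only)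
def pvStepR (S : PySem.Set (Int × Int)) (a b : Int)
    (st : List (Int × Int) × PySem.Set (Int × Int) × List (Int × Int)) (d : Int × Int) :
    List (Int × Int) × PySem.Set (Int × Int) × List (Int × Int) :=
  let n := (a + d.1, b + d.2)
  if PySem.Set.contains S n = true ∧ PySem.Set.contains st.2.1 n = false then
    (st.1 ++ [n], PySem.Set.add st.2.1 n, st.2.2 ++ [n])
  else st

def pvReplay (S : PySem.Set (Int × Int)) :
    Nat → List (Int × Int) → PySem.Set (Int × Int) → List (Int × Int) →
    List (Int × Int) × PySem.Set (Int × Int)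
  | 0, _, v, p => (p, v)
  | _ + 1, [], v, p => (p, v)
  | f + 1, (a, b) :: rest, v, p =>
    let st := pvDirsA.foldl (pvStepR S a b) (rest, v, p)
    pvReplay S f st.1 st.2.1 st.2.2

def pvSig (S : PySem.Set (Int × Int)) (f : Nat) : List (Int × Int) :=
  (pvReplay S f [(0, 0)] PySem.Set.empty []).1

-- the properties of an island's offset set that the counting argument needs
def pvGood (S : PySem.Set (Int × Int)) (cap : Nat) : Prop :=
  S.Nodup ∧ (0, 0) ∈ S ∧ S.length ≤ cap ∧
    ∀ o ∈ S, Relation.ReflTransGen (pvStepS S) (0, 0) o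

-- ---------- basic connectivity lemmas ----------

theorem pvAdj_symm (rows cols : Int) (grid : List (List Int)) (p q : Int × Int)
    (h : pvAdj rows cols grid p q) : pvAdj rows cols grid q p := by
  obtain ⟨hp, hq, hd⟩ := h
  refine ⟨hq, hp, ?_⟩
  simp only [pvDirsA, List.mem_cons, List.not_mem_nil, or_false, Prod.mk.injEq] at hd ⊢
  omega

theorem pvConn_symm (rows cols : Int) (grid : List (List Int)) (p q : Int × Int)
    (h : pvConn rows cols grid p q) : pvConn rows cols grid q p := by
  induction h with
  | refl => exact Relation.ReflTransGen.refl
  | tail _ hstep ih =>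
    exact Relation.ReflTransGen.trans
      (Relation.ReflTransGen.single (pvAdj_symm rows cols grid _ _ hstep)) ih

theorem pvConn_land (rows cols : Int) (grid : List (List Int)) (p q : Int × Int)
    (hp : pvLand rows cols grid p) (h : pvConn rows cols grid p q) :
    pvLand rows cols grid q := by
  induction h with
  | refl => exact hp
  | tail _ hstep _ => exact hstep.2.1

theorem pvContains_eq {α : Type} [BEq α] [LawfulBEq α] (l : List α) (x : α) :
    PySem.Set.contains l x = decide (x ∈ l) := by
  simp [PySem.Set.contains, List.contains_eq_mem]

-- ---------- bisimulation: A's grid BFS is the abstract replay on the island ----------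

theorem pvFoldAR (rows cols : Int) (grid : List (List Int)) (si sj : Int)
    (S : PySem.Set (Int × Int)) (v0 : PySem.Set (Int × Int))
    (hseed : pvLand rows cols grid (si, sj))
    (hS : ∀ o, o ∈ S ↔ pvConn rows cols grid (si, sj) (pvShift si sj o))
    (hv0 : ∀ x ∈ v0, ¬ pvConn rows cols grid (si, sj) x)
    (a b : Int) (hab : (a, b) ∈ S) :
    ∀ (ds : List (Int × Int)), (∀ d ∈ ds, d ∈ pvDirsA) →
    ∀ (q : List (Int × Int)) (vis : PySem.Set (Int × Int)) (pat : List (Int × Int)),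
      (∀ o ∈ q, o ∈ S) → (∀ o ∈ vis, o ∈ S) →
      ds.foldl (pvStepA rows cols grid si sj (si + a) (sj + b))
          (q.map (pvShift si sj), v0 ++ vis.map (pvShift si sj), pat)
        = ((ds.foldl (pvStepR S a b) (q, vis, pat)).1.map (pvShift si sj),
           v0 ++ ((ds.foldl (pvStepR S a b) (q, vis, pat)).2.1).map (pvShift si sj),
           (ds.foldl (pvStepR S a b) (q, vis, pat)).2.2) ∧
      (∀ o ∈ (ds.foldl (pvStepR S a b) (q, vis, pat)).1, o ∈ S) ∧
      (∀ o ∈ (ds.foldl (pvStepR S a b) (q, vis, pat)).2.1, o ∈ S) := by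
  have hconn_ab : pvConn rows cols grid (si, sj) (pvShift si sj (a, b)) := (hS (a, b)).mp hab
  have hland_ab : pvLand rows cols grid (pvShift si sj (a, b)) :=
    pvConn_land rows cols grid _ _ hseed hconn_ab
  intro ds
  induction ds with
  | nil => intro _ q vis pat hq hvis; exact ⟨rfl, hq, hvis⟩
  | cons d ds ih =>
    intro hds q vis pat hq hvis
    obtain ⟨d1, d2⟩ := d
    have hd : ((d1, d2) : Int × Int) ∈ pvDirsA := hds _ (by simp)
    have hds' : ∀ d' ∈ ds, d' ∈ pvDirsA := fun d' h => hds d' (by simp [h])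
    simp only [List.foldl_cons]
    -- the probed offset and absolute cell
    have hn1 : si + a + d1 = si + (a + d1) := by ring
    have hn2 : sj + b + d2 = sj + (b + d2) := by ring
    have hlandiff : pvLand rows cols grid (pvShift si sj (a + d1, b + d2)) ↔ (a + d1, b + d2) ∈ S := by
      constructor
      · intro hl
        refine (hS _).mpr (Relation.ReflTransGen.tail hconn_ab ⟨hland_ab, hl, ?_⟩)
        have he : ((pvShift si sj (a + d1, b + d2)).1 - (pvShift si sj (a, b)).1,
            (pvShift si sj (a + d1, b + d2)).2 - (pvShift si sj (a, b)).2) = (d1, d2) := by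
          simp only [pvShift, Prod.mk.injEq]
          omega
        rw [he]; exact hd
      · intro hoS
        exact pvConn_land rows cols grid _ _ hseed ((hS _).mp hoS)
    have hmemvisA : ∀ (o : Int × Int), o ∈ S →
        (pvShift si sj o ∈ v0 ++ vis.map (pvShift si sj) ↔ o ∈ vis) := by
      intro o hoS
      have hnconn : pvConn rows cols grid (si, sj) (pvShift si sj o) := (hS o).mp hoS
      constructor
      · intro hmem
        rcases List.mem_append.mp hmem with hv0' | hm
        · exact absurd hnconn (hv0 _ hv0')
        · obtain ⟨o', ho', he⟩ := List.mem_map.mp hm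
          have : o' = o := by
            obtain ⟨x1, x2⟩ := o'; obtain ⟨y1, y2⟩ := o
            simp only [pvShift, Prod.mk.injEq] at he
            simp only [Prod.mk.injEq]
            omega
          exact this ▸ ho'
      · intro hmem
        exact List.mem_append.mpr (Or.inr (List.mem_map.mpr ⟨o, hmem, rfl⟩))
    -- one-step correspondence
    have hstep : pvStepA rows cols grid si sj (si + a) (sj + b)
          (q.map (pvShift si sj), v0 ++ vis.map (pvShift si sj), pat) (d1, d2)
        = (((pvStepR S a b (q, vis, pat) (d1, d2)).1).map (pvShift si sj),
           v0 ++ ((pvStepR S a b (q, vis, pat) (d1, d2)).2.1).map (pvShift si sj),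
           (pvStepR S a b (q, vis, pat) (d1, d2)).2.2) ∧
        (∀ o ∈ (pvStepR S a b (q, vis, pat) (d1, d2)).1, o ∈ S) ∧
        (∀ o ∈ (pvStepR S a b (q, vis, pat) (d1, d2)).2.1, o ∈ S) := by
      by_cases hg : ((a + d1, b + d2) : Int × Int) ∈ S ∧ ((a + d1, b + d2) : Int × Int) ∉ vis
      · have hgR : (PySem.Set.contains S (a + d1, b + d2) = true ∧
            PySem.Set.contains ((q, vis, pat) : List (Int × Int) × PySem.Set (Int × Int) × List (Int × Int)).2.1 (a + d1, b + d2) = false) := by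
          simp only [PySem.Set.contains]
          constructor
          · simpa using hg.1
          · simpa using hg.2
        have hland : pvLand rows cols grid (pvShift si sj (a + d1, b + d2)) := hlandiff.mpr hg.1
        have hgA : 0 ≤ si + a + d1 ∧ si + a + d1 < rows ∧ 0 ≤ sj + b + d2 ∧ sj + b + d2 < cols ∧
            pvCell grid (si + a + d1) (sj + b + d2) = 1 ∧
            PySem.Set.contains (v0 ++ vis.map (pvShift si sj)) (si + a + d1, sj + b + d2) = false := by
          obtain ⟨h1, h2, h3, h4, h5⟩ := hland
          simp only [pvShift] at h1 h2 h3 h4 h5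
          refine ⟨by omega, by omega, by omega, by omega, by rw [hn1, hn2]; exact h5, ?_⟩
          have := (hmemvisA _ hg.1)
          simp only [PySem.Set.contains]
          rw [hn1, hn2]
          have hnot : pvShift si sj (a + d1, b + d2) ∉ v0 ++ vis.map (pvShift si sj) :=
            fun hmem => hg.2 (this.mp hmem)
          simpa [pvShift] using hnot
        rw [pvStepA, pvStepR]
        simp only []
        rw [if_pos hgA, if_pos hgR]
        refine ⟨?_, ?_, ?_⟩
        · simp only [Prod.mk.injEq]
          refine ⟨?_, ?_, ?_⟩
          · rw [List.map_append]; simp [pvShift, hn1, hn2]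
          · have hadd : PySem.Set.add (v0 ++ vis.map (pvShift si sj)) (si + a + d1, sj + b + d2)
                = (v0 ++ vis.map (pvShift si sj)) ++ [(si + a + d1, sj + b + d2)] := by
              simp only [PySem.Set.add]
              rw [if_neg (by simpa using hgA.2.2.2.2.2)]
            have hadd2 : PySem.Set.add vis ((a + d1, b + d2) : Int × Int) = vis ++ [(a + d1, b + d2)] := by
              simp only [PySem.Set.add, PySem.Set.contains]
              rw [if_neg (by simpa using hg.2)]
            rw [hadd, hadd2, List.map_append, List.append_assoc]
            simp [pvShift, hn1, hn2]
          · simp only [List.append_cancel_left_eq, List.cons.injEq, and_true, Prod.mk.injEq]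
            constructor <;> ring
        · intro o ho
          rcases List.mem_append.mp ho with h | h
          · exact hq o h
          · simp at h; exact h ▸ hg.1
        · intro o ho
          have : o ∈ PySem.Set.add vis ((a + d1, b + d2) : Int × Int) := ho
          rcases (PySem.Set.mem_add vis _ o).mp this with h | h
          · exact hvis o h
          · exact h ▸ hg.1
      · have hgR : ¬ (PySem.Set.contains S (a + d1, b + d2) = true ∧
            PySem.Set.contains ((q, vis, pat) : List (Int × Int) × PySem.Set (Int × Int) × List (Int × Int)).2.1 (a + d1, b + d2) = false) := by
          simp only [PySem.Set.contains]
          intro ⟨h1, h2⟩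
          exact hg ⟨by simpa using h1, by simpa using h2⟩
        have hgA : ¬ (0 ≤ si + a + d1 ∧ si + a + d1 < rows ∧ 0 ≤ sj + b + d2 ∧ sj + b + d2 < cols ∧
            pvCell grid (si + a + d1) (sj + b + d2) = 1 ∧
            PySem.Set.contains (v0 ++ vis.map (pvShift si sj)) (si + a + d1, sj + b + d2) = false) := by
          intro ⟨h1, h2, h3, h4, h5, h6⟩
          have hland : pvLand rows cols grid (pvShift si sj (a + d1, b + d2)) := by
            refine ⟨by simp [pvShift]; omega, by simp [pvShift]; omega, by simp [pvShift]; omega,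
              by simp [pvShift]; omega, ?_⟩
            simp only [pvShift]
            rw [← hn1, ← hn2]; exact h5
          have hS' : ((a + d1, b + d2) : Int × Int) ∈ S := hlandiff.mp hland
          have hvis' : ((a + d1, b + d2) : Int × Int) ∉ vis := by
            intro hmem
            have := (hmemvisA _ hS').mpr hmem
            have hmem' : ((si + a + d1, sj + b + d2) : Int × Int) ∈ v0 ++ vis.map (pvShift si sj) := by
              have h' : pvShift si sj (a + d1, b + d2) ∈ v0 ++ vis.map (pvShift si sj) := this
              simpa [pvShift, ← hn1, ← hn2] using h'
            rw [pvContains_eq, decide_eq_false_iff_not] at h6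
            exact h6 hmem'
          exact hg ⟨hS', hvis'⟩
        rw [pvStepA, pvStepR]
        simp only []
        rw [if_neg hgA, if_neg hgR]
        exact ⟨rfl, hq, hvis⟩
    obtain ⟨he, hq', hvis'⟩ := hstep
    rw [he]
    exact ih hds' _ _ _ hq' hvis'

theorem pvBfsA_eq_replay (rows cols : Int) (grid : List (List Int)) (si sj : Int)
    (S : PySem.Set (Int × Int)) (v0 : PySem.Set (Int × Int))
    (hseed : pvLand rows cols grid (si, sj))
    (hS : ∀ o, o ∈ S ↔ pvConn rows cols grid (si, sj) (pvShift si sj o))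
    (hv0 : ∀ x ∈ v0, ¬ pvConn rows cols grid (si, sj) x) :
    ∀ (f : Nat) (q : List (Int × Int)) (vis : PySem.Set (Int × Int)) (pat : List (Int × Int)),
      (∀ o ∈ q, o ∈ S) → (∀ o ∈ vis, o ∈ S) →
      pvBfsA rows cols grid si sj f (q.map (pvShift si sj)) (v0 ++ vis.map (pvShift si sj)) pat
        = ((pvReplay S f q vis pat).1, v0 ++ ((pvReplay S f q vis pat).2).map (pvShift si sj)) := by
  intro f
  induction f with
  | zero =>
    intro q vis pat _ _
    cases q with
    | nil => rfl
    | cons c rest => obtain ⟨a, b⟩ := c; rfl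
  | succ f ih =>
    intro q vis pat hq hvis
    cases q with
    | nil => rfl
    | cons c rest =>
      obtain ⟨a, b⟩ := c
      have hmapq : (((a, b) :: rest).map (pvShift si sj))
          = (si + a, sj + b) :: rest.map (pvShift si sj) := by simp [pvShift]
      rw [hmapq]
      have hab : ((a, b) : Int × Int) ∈ S := hq _ (by simp)
      have hrest : ∀ o ∈ rest, o ∈ S := fun o h => hq o (by simp [h])
      obtain ⟨he, hq', hvis'⟩ := pvFoldAR rows cols grid si sj S v0 hseed hS hv0 a b hab
        pvDirsA (fun d h => h) rest vis pat hrest hvis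
      have eA : pvBfsA rows cols grid si sj (f + 1)
            ((si + a, sj + b) :: rest.map (pvShift si sj)) (v0 ++ vis.map (pvShift si sj)) pat
          = pvBfsA rows cols grid si sj f
              ((pvDirsA.foldl (pvStepA rows cols grid si sj (si + a) (sj + b))
                (rest.map (pvShift si sj), v0 ++ vis.map (pvShift si sj), pat)).1)
              ((pvDirsA.foldl (pvStepA rows cols grid si sj (si + a) (sj + b))
                (rest.map (pvShift si sj), v0 ++ vis.map (pvShift si sj), pat)).2.1)
              ((pvDirsA.foldl (pvStepA rows cols grid si sj (si + a) (sj + b))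
                (rest.map (pvShift si sj), v0 ++ vis.map (pvShift si sj), pat)).2.2) := rfl
      have eR : pvReplay S (f + 1) ((a, b) :: rest) vis pat
          = pvReplay S f ((pvDirsA.foldl (pvStepR S a b) (rest, vis, pat)).1)
              ((pvDirsA.foldl (pvStepR S a b) (rest, vis, pat)).2.1)
              ((pvDirsA.foldl (pvStepR S a b) (rest, vis, pat)).2.2) := rfl
      rw [eA, eR, he]
      exact ih _ _ _ hq' hvis'

-- ---------- adequacy of the abstract replay ----------

theorem pvFoldR_char (S : PySem.Set (Int × Int)) (a b : Int) :
    ∀ (ds : List (Int × Int)) (q : List (Int × Int)) (vis : PySem.Set (Int × Int)) (pat : List (Int × Int)),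
      ∃ Δ : List (Int × Int),
        ds.foldl (pvStepR S a b) (q, vis, pat) = (q ++ Δ, vis ++ Δ, pat ++ Δ) ∧
        (∀ o ∈ Δ, o ∈ S ∧ o ∉ vis) ∧ Δ.Nodup ∧
        (∀ d ∈ ds, (a + d.1, b + d.2) ∈ S → (a + d.1, b + d.2) ∈ vis ++ Δ) := by
  intro ds
  induction ds with
  | nil =>
    intro q vis pat
    exact ⟨[], by simp, by simp, List.nodup_nil, by simp⟩
  | cons d ds ih =>
    intro q vis pat
    simp only [List.foldl_cons]
    by_cases hg : (PySem.Set.contains S (a + d.1, b + d.2) = true ∧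
        PySem.Set.contains vis (a + d.1, b + d.2) = false)
    · have hgS : ((a + d.1, b + d.2) : Int × Int) ∈ S := by
        have := hg.1; rw [pvContains_eq, decide_eq_true_eq] at this; exact this
      have hgv : ((a + d.1, b + d.2) : Int × Int) ∉ vis := by
        have := hg.2; rw [pvContains_eq, decide_eq_false_iff_not] at this; exact this
      have hstep : pvStepR S a b (q, vis, pat) d
          = (q ++ [(a + d.1, b + d.2)], vis ++ [(a + d.1, b + d.2)], pat ++ [(a + d.1, b + d.2)]) := by
        rw [pvStepR]
        simp only []
        rw [if_pos hg]
        have : PySem.Set.add vis ((a + d.1, b + d.2) : Int × Int) = vis ++ [(a + d.1, b + d.2)] := by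
          simp only [PySem.Set.add]
          rw [if_neg (by rw [pvContains_eq]; simpa using hgv)]
        rw [this]
      rw [hstep]
      obtain ⟨Δ, he, hmem, hnd, hcov⟩ :=
        ih (q ++ [(a + d.1, b + d.2)]) (vis ++ [(a + d.1, b + d.2)]) (pat ++ [(a + d.1, b + d.2)])
      refine ⟨(a + d.1, b + d.2) :: Δ, ?_, ?_, ?_, ?_⟩
      · rw [he]; simp
      · intro o ho
        rcases List.mem_cons.mp ho with rfl | ho
        · exact ⟨hgS, hgv⟩
        · have := hmem o ho
          exact ⟨this.1, fun hv => this.2 (by simp [hv])⟩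
      · refine List.nodup_cons.mpr ⟨?_, hnd⟩
        intro hmem'
        exact (hmem _ hmem').2 (by simp)
      · intro d' hd' hS'
        rcases List.mem_cons.mp hd' with rfl | hd'
        · simp
        · have := hcov d' hd' hS'
          simp only [List.mem_append, List.mem_cons] at this ⊢
          tauto
    · have hstep : pvStepR S a b (q, vis, pat) d = (q, vis, pat) := by
        rw [pvStepR]
        simp only []
        rw [if_neg hg]
      rw [hstep]
      obtain ⟨Δ, he, hmem, hnd, hcov⟩ := ih q vis pat
      refine ⟨Δ, he, hmem, hnd, ?_⟩
      intro d' hd' hS'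
      rcases List.mem_cons.mp hd' with rfl | hd'
      · -- the head direction was not taken: its target is already visited (or not in S)
        have : ¬ (PySem.Set.contains vis (a + d'.1, b + d'.2) = false) := by
          intro hfalse
          exact hg ⟨by rw [pvContains_eq, decide_eq_true_eq]; exact hS', hfalse⟩
        have : ((a + d'.1, b + d'.2) : Int × Int) ∈ vis := by
          by_contra hnv
          exact this (by rw [pvContains_eq, decide_eq_false_iff_not]; exact hnv)
        simp [this]
      · exact hcov d' hd' hS'


theorem pvReplay_final (S : PySem.Set (Int × Int)) (hnd : S.Nodup) :
    ∀ (f : Nat) (q : List (Int × Int)) (vis : PySem.Set (Int × Int)) (pat : List (Int × Int)),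
      (∀ o ∈ q, o ∈ S) → (∀ o ∈ q, o = (0, 0) ∨ o ∈ vis) →
      (∀ o ∈ vis, o ∈ S) → vis.Nodup → (∀ o, o ∈ pat ↔ o ∈ vis) →
      (∀ x : Int × Int, (x = (0, 0) ∨ x ∈ vis) → x ∉ q →
        ∀ d ∈ pvDirsA, (x.1 + d.1, x.2 + d.2) ∈ S → (x.1 + d.1, x.2 + d.2) ∈ vis) →
      q.length + (S.length - vis.length) ≤ f →
      (∀ o, o ∈ (pvReplay S f q vis pat).1 ↔ o ∈ (pvReplay S f q vis pat).2) ∧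
      (∀ o ∈ (pvReplay S f q vis pat).2, o ∈ S) ∧
      (∀ x : Int × Int, (x = (0, 0) ∨ x ∈ (pvReplay S f q vis pat).2) →
        ∀ d ∈ pvDirsA, (x.1 + d.1, x.2 + d.2) ∈ S → (x.1 + d.1, x.2 + d.2) ∈ (pvReplay S f q vis pat).2) := by
  intro f
  induction f with
  | zero =>
    intro q vis pat hq hqsub hvis hvnd hpat hrem hfuel
    have hq0 : q = [] := by
      cases q with
      | nil => rfl
      | cons c rest => simp at hfuel
    subst hq0
    exact ⟨hpat, hvis, fun x hx d hd hS' => hrem x hx (by simp) d hd hS'⟩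
  | succ f ih =>
    intro q vis pat hq hqsub hvis hvnd hpat hrem hfuel
    cases q with
    | nil =>
      exact ⟨hpat, hvis, fun x hx d hd hS' => hrem x hx (by simp) d hd hS'⟩
    | cons c rest =>
      obtain ⟨a, b⟩ := c
      obtain ⟨Δ, he, hmemΔ, hndΔ, hcov⟩ := pvFoldR_char S a b pvDirsA rest vis pat
      have eR : pvReplay S (f + 1) ((a, b) :: rest) vis pat
          = pvReplay S f ((pvDirsA.foldl (pvStepR S a b) (rest, vis, pat)).1)
              ((pvDirsA.foldl (pvStepR S a b) (rest, vis, pat)).2.1)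
              ((pvDirsA.foldl (pvStepR S a b) (rest, vis, pat)).2.2) := rfl
      rw [eR, he]
      simp only []
      have hvis' : ∀ o ∈ vis ++ Δ, o ∈ S := by
        intro o ho
        rcases List.mem_append.mp ho with h | h
        · exact hvis o h
        · exact (hmemΔ o h).1
      have hvnd' : (vis ++ Δ).Nodup := by
        rw [List.nodup_append]
        refine ⟨hvnd, hndΔ, ?_⟩
        intro x hx y hy he
        exact (hmemΔ y hy).2 (he ▸ hx)
      have hlen' : (vis ++ Δ).length ≤ S.length := by
        classical
        have hsub : (vis ++ Δ).toFinset ⊆ S.toFinset := by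
          intro x hx
          rw [List.mem_toFinset] at hx ⊢
          exact hvis' x hx
        have := Finset.card_le_card hsub
        rwa [List.toFinset_card_of_nodup hvnd', List.toFinset_card_of_nodup hnd] at this
      refine ih (rest ++ Δ) (vis ++ Δ) (pat ++ Δ) ?_ ?_ hvis' hvnd' ?_ ?_ ?_
      · intro o ho
        rcases List.mem_append.mp ho with h | h
        · exact hq o (by simp [h])
        · exact (hmemΔ o h).1
      · intro o ho
        rcases List.mem_append.mp ho with h | h
        · rcases hqsub o (by simp [h]) with h' | h'
          · exact Or.inl h'
          · exact Or.inr (by simp [h'])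
        · exact Or.inr (by simp [h])
      · intro o
        rw [List.mem_append, List.mem_append, hpat o]
      · intro x hx hxq d hd hS'
        by_cases hxab : x = (a, b)
        · subst hxab
          exact hcov d hd hS'
        · have hxvis : x = (0, 0) ∨ x ∈ vis := by
            rcases hx with h | h
            · exact Or.inl h
            · rcases List.mem_append.mp h with h' | h'
              · exact Or.inr h'
              · exact absurd (List.mem_append.mpr (Or.inr h')) (by
                  intro hmem
                  exact hxq hmem)
          have hxq' : x ∉ (a, b) :: rest := by
            intro hmem
            rcases List.mem_cons.mp hmem with h' | h'
            · exact hxab h'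
            · exact hxq (List.mem_append.mpr (Or.inl h'))
          have := hrem x hxvis hxq' d hd hS'
          exact List.mem_append.mpr (Or.inl this)
      · have : (vis ++ Δ).length = vis.length + Δ.length := by simp
        have hrq : (rest ++ Δ).length = rest.length + Δ.length := by simp
        simp only [List.length_cons] at hfuel
        omega

-- the signature of a Good set, together with (0,0), is exactly the set
theorem pvSig_mem (S : PySem.Set (Int × Int)) (cap : Nat) (hS : pvGood S cap) (f : Nat)
    (hf : cap + 1 ≤ f) :
    ∀ o, (o ∈ pvSig S f ∨ o = (0, 0)) ↔ o ∈ S := by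
  obtain ⟨hnd, horig, hlen, hconn⟩ := hS
  have hfin := pvReplay_final S hnd f [(0, 0)] PySem.Set.empty []
    (by intro o ho; simp at ho; exact ho ▸ horig)
    (by intro o ho; simp at ho; exact Or.inl ho)
    (by intro o ho; simp [PySem.Set.empty] at ho)
    (List.nodup_nil)
    (by intro o; simp [PySem.Set.empty])
    (by
      intro x hx hxq d hd hS'
      rcases hx with h | h
      · exact absurd (by simp [h]) hxq
      · simp [PySem.Set.empty] at h)
    (by simp [PySem.Set.empty]; omega)
  obtain ⟨hpatvis, hvisS, hclo⟩ := hfin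
  have hcover : ∀ o ∈ S, o = (0, 0) ∨ o ∈ (pvReplay S f [(0, 0)] PySem.Set.empty []).2 := by
    intro o hoS
    have hpath := hconn o hoS
    clear hoS
    induction hpath with
    | refl => exact Or.inl rfl
    | tail hpq hstep ih =>
      rename_i p q
      obtain ⟨hpS, hqS, hdS⟩ := hstep
      right
      have hq' : (p.1 + (q.1 - p.1, q.2 - p.2).1, p.2 + (q.1 - p.1, q.2 - p.2).2) = q := by
        obtain ⟨q1, q2⟩ := q; simp only [Prod.mk.injEq]; omega
      have hres := hclo p ih (q.1 - p.1, q.2 - p.2) hdS (by rw [hq']; exact hqS)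
      rwa [hq'] at hres
  intro o
  constructor
  · intro h
    rcases h with h | h
    · exact hvisS o ((hpatvis o).mp h)
    · exact h ▸ horig
  · intro hoS
    rcases hcover o hoS with h | h
    · exact Or.inr h
    · exact Or.inl ((hpatvis o).mpr h)

-- the replay only inspects membership of S
theorem pvReplay_congr (S T : PySem.Set (Int × Int)) (hST : ∀ o, o ∈ S ↔ o ∈ T) :
    ∀ (f : Nat) (q : List (Int × Int)) (vis : PySem.Set (Int × Int)) (pat : List (Int × Int)),
      pvReplay S f q vis pat = pvReplay T f q vis pat := by
  intro f
  induction f with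
  | zero => intro q vis pat; cases q with
    | nil => rfl
    | cons c rest => cases c; rfl
  | succ f ih =>
    intro q vis pat
    cases q with
    | nil => rfl
    | cons c rest =>
      obtain ⟨a, b⟩ := c
      show pvReplay S (f + 1) ((a, b) :: rest) vis pat = pvReplay T (f + 1) ((a, b) :: rest) vis pat
      rw [pvReplay, pvReplay]
      have hfold : ∀ (ds : List (Int × Int)) st,
          ds.foldl (pvStepR S a b) st = ds.foldl (pvStepR T a b) st := by
        intro ds
        induction ds with
        | nil => intro st; rfl
        | cons d ds ihd =>
          intro st
          simp only [List.foldl_cons]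
          have : pvStepR S a b st d = pvStepR T a b st d := by
            have hc : PySem.Set.contains S (a + d.1, b + d.2)
                = PySem.Set.contains T (a + d.1, b + d.2) := by
              have := hST (a + d.1, b + d.2)
              simp only [PySem.Set.contains]
              by_cases h : (a + d.1, b + d.2) ∈ S
              · simp [h, this.mp h]
              · have hT : (a + d.1, b + d.2) ∉ T := fun hT => h (this.mpr hT)
                simp [h, hT]
            simp only [pvStepR, hc]
          rw [this, ihd]
      rw [hfold]
      exact ih _ _ _

-- ---------- closure correctness: pvRegion computes the island ----------

theorem pvRegion_spec (rows cols : Int) (grid : List (List Int)) (si sj : Int)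
    (hseed : pvLand rows cols grid (si, sj)) (cap : Nat)
    (hcap : ∀ (l : List (Int × Int)), l.Nodup → (∀ x ∈ l, pvLand rows cols grid x) → l.length ≤ cap) :
    ∀ (f : Nat) (region : PySem.Set (Int × Int)),
      region.Nodup → (∀ x ∈ region, pvConn rows cols grid (si, sj) x) → (si, sj) ∈ region →
      cap + 1 ≤ f + region.length →
      (pvRegion rows cols grid f region).Nodup ∧
      (∀ x, x ∈ pvRegion rows cols grid f region ↔ pvConn rows cols grid (si, sj) x) := by
  have hgrown_mem : ∀ (region : PySem.Set (Int × Int)) (x : Int × Int),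
      x ∈ pvGrown rows cols grid region ↔
        ((∃ p ∈ region, ∃ d ∈ pvDirsB, x = (p.1 + d.1, p.2 + d.2)) ∧
          pvLandB rows cols grid x = true ∧ x ∉ region) := by
    intro region x
    unfold pvGrown PySem.Set.diff
    rw [List.mem_filter]
    rw [PySem.Set.mem_ofList, List.mem_filter, List.mem_flatMap]
    constructor
    · rintro ⟨⟨⟨p, hp, hx⟩, hlnd⟩, hnc⟩
      refine ⟨⟨p, hp, ?_⟩, hlnd, ?_⟩
      · obtain ⟨d, hd, he⟩ := List.mem_map.mp hx
        exact ⟨d, hd, he.symm⟩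
      · rw [pvContains_eq] at hnc
        simpa using hnc
    · rintro ⟨⟨p, hp, d, hd, he⟩, hlnd, hnr⟩
      refine ⟨⟨⟨p, hp, ?_⟩, hlnd⟩, ?_⟩
      · exact List.mem_map.mpr ⟨d, hd, he.symm⟩
      · rw [pvContains_eq]
        simpa using hnr
  have hlandB : ∀ x, pvLandB rows cols grid x = true ↔ pvLand rows cols grid x := by
    intro x
    unfold pvLandB pvLand
    rw [decide_eq_true_eq]
  have hUnionPrefix : ∀ (t s : PySem.Set (Int × Int)), ∃ suf, PySem.Set.union s t = s ++ suf := by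
    intro t
    induction t with
    | nil => intro s; exact ⟨[], by simp [PySem.Set.union, PySem.Set.update]⟩
    | cons y t ih =>
      intro s
      have he : PySem.Set.union s (y :: t) = PySem.Set.union (PySem.Set.add s y) t := by
        simp [PySem.Set.union, PySem.Set.update]
      rw [he]
      obtain ⟨suf, hsuf⟩ := ih (PySem.Set.add s y)
      by_cases hy : PySem.Set.contains s y = true
      · refine ⟨suf, ?_⟩
        rw [hsuf]
        simp only [PySem.Set.add]
        rw [if_pos hy]
      · refine ⟨y :: suf, ?_⟩
        rw [hsuf]
        simp only [PySem.Set.add]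
        rw [if_neg hy]
        rw [List.append_assoc]
        rfl
  intro f
  induction f with
  | zero =>
    intro region hnd hconn hseedmem hfuel
    exfalso
    have hland : ∀ x ∈ region, pvLand rows cols grid x :=
      fun x hx => pvConn_land rows cols grid _ _ hseed (hconn x hx)
    have := hcap region hnd hland
    omega
  | succ f ih =>
    intro region hnd hconn hseedmem hfuel
    rw [pvRegion]
    by_cases hempty : pvGrown rows cols grid region = []
    · rw [if_pos hempty]
      refine ⟨hnd, ?_⟩
      intro x
      constructor
      · exact hconn x
      · intro hc
        induction hc with
        | refl => exact hseedmem
        | tail hpq hstep ihc =>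
          rename_i p q
          obtain ⟨hpL, hqL, hdL⟩ := hstep
          by_cases hqr : q ∈ region
          · exact hqr
          · exfalso
            have hq' : (p.1 + (q.1 - p.1, q.2 - p.2).1, p.2 + (q.1 - p.1, q.2 - p.2).2) = q := by
              obtain ⟨q1, q2⟩ := q; simp only [Prod.mk.injEq]; omega
            have : q ∈ pvGrown rows cols grid region := by
              rw [hgrown_mem]
              refine ⟨⟨p, ihc, (q.1 - p.1, q.2 - p.2), ?_, hq'.symm⟩, (hlandB q).mpr hqL, hqr⟩
              have : pvDirsB = pvDirsA := rfl
              rw [this]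
              exact hdL
            rw [hempty] at this
            simp at this
    · rw [if_neg hempty]
      obtain ⟨g, hg⟩ := List.exists_mem_of_ne_nil _ hempty
      have hgmem := (hgrown_mem region g).mp hg
      have hnd' : (PySem.Set.union region (pvGrown rows cols grid region)).Nodup :=
        PySem.Set.nodup_union _ _ hnd
      have hconn' : ∀ x ∈ PySem.Set.union region (pvGrown rows cols grid region),
          pvConn rows cols grid (si, sj) x := by
        intro x hx
        rcases (PySem.Set.mem_union _ _ x).mp hx with h | h
        · exact hconn x h
        · obtain ⟨⟨p, hp, d, hd, he⟩, hlnd, _⟩ := (hgrown_mem region x).mp h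
          have hpc := hconn p hp
          refine Relation.ReflTransGen.tail hpc ?_
          refine ⟨pvConn_land rows cols grid _ _ hseed hpc, (hlandB x).mp hlnd, ?_⟩
          have hdiff : (x.1 - p.1, x.2 - p.2) = d := by
            obtain ⟨d1, d2⟩ := d
            rw [he]
            simp only [Prod.mk.injEq]
            constructor <;> ring
          rw [hdiff]
          have : pvDirsB = pvDirsA := rfl
          rw [← this]
          exact hd
      have hseed' : (si, sj) ∈ PySem.Set.union region (pvGrown rows cols grid region) :=
        (PySem.Set.mem_union _ _ _).mpr (Or.inl hseedmem)
      have hlen' : region.length + 1 ≤ (PySem.Set.union region (pvGrown rows cols grid region)).length := by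
        obtain ⟨suf, hsuf⟩ := hUnionPrefix (pvGrown rows cols grid region) region
        have hgin : g ∈ PySem.Set.union region (pvGrown rows cols grid region) :=
          (PySem.Set.mem_union _ _ _).mpr (Or.inr hg)
        rw [hsuf] at hgin ⊢
        have : g ∈ suf := by
          rcases List.mem_append.mp hgin with h | h
          · exact absurd h hgmem.2.2
          · exact h
        have : suf ≠ [] := fun h => by simp [h] at this
        have : 1 ≤ suf.length := List.length_pos_iff.mpr this
        simp only [List.length_append]
        omega
      exact ih _ hnd' hconn' hseed' (by omega)

-- every nodup list of land cells has at most rows.toNat * cols.toNat elements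
theorem pvLand_card (rows cols : Int) (grid : List (List Int)) :
    ∀ (l : List (Int × Int)), l.Nodup → (∀ x ∈ l, pvLand rows cols grid x) →
      l.length ≤ rows.toNat * cols.toNat := by
  intro l hnd hland
  classical
  have hsub : l.toFinset ⊆ Finset.Ico (0 : Int) rows ×ˢ Finset.Ico (0 : Int) cols := by
    intro x hx
    have hx' : x ∈ l := by simpa using hx
    obtain ⟨h1, h2, h3, h4, _⟩ := hland x hx'
    simp only [Finset.mem_product, Finset.mem_Ico]
    exact ⟨⟨h1, h2⟩, ⟨h3, h4⟩⟩
  have hcard := Finset.card_le_card hsub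
  rw [List.toFinset_card_of_nodup hnd] at hcard
  simpa [Finset.card_product, Int.card_Ico] using hcard

-- ---------- canonical signatures: sorted2 is determined by the set ----------

def pvLexLe (a b : Int × Int) : Prop := a.1 < b.1 ∨ (a.1 = b.1 ∧ a.2 ≤ b.2)

theorem pvSorted2_pairwise (xs : List (Int × Int)) :
    (PySem.List.sorted2 xs (fun o => o.1) (fun o => o.2) false).Pairwise pvLexLe := by
  have hins : ∀ (x : Int × Int) (l : List (Int × Int)), l.Pairwise pvLexLe →
      (PySem.List.insertBy
        (fun a b => decide (a.1 < b.1) || !decide (b.1 < a.1) && decide (a.2 < b.2)) x l).Pairwise pvLexLe := by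
    intro x l
    induction l with
    | nil => intro _; simp [PySem.List.insertBy, pvLexLe]
    | cons y ys ih =>
      intro hp
      rw [List.pairwise_cons] at hp
      obtain ⟨hy, hys⟩ := hp
      rw [PySem.List.insertBy]
      by_cases hb : (decide (x.1 < y.1) || !decide (y.1 < x.1) && decide (x.2 < y.2)) = true
      · rw [if_pos hb]
        simp only [Bool.or_eq_true, Bool.and_eq_true, Bool.not_eq_eq_eq_not, Bool.not_true,
          decide_eq_true_eq, decide_eq_false_iff_not] at hb
        have hxy : pvLexLe x y := by unfold pvLexLe; omega
        refine List.pairwise_cons.mpr ⟨?_, List.pairwise_cons.mpr ⟨hy, hys⟩⟩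
        intro z hz
        rcases List.mem_cons.mp hz with rfl | hz
        · exact hxy
        · have := hy z hz
          unfold pvLexLe at *; omega
      · rw [if_neg hb]
        simp only [Bool.or_eq_true, Bool.and_eq_true, Bool.not_eq_eq_eq_not, Bool.not_true,
          decide_eq_true_eq, decide_eq_false_iff_not] at hb
        push Not at hb
        have hyx : pvLexLe y x := by
          unfold pvLexLe
          by_cases h1 : y.1 < x.1
          · exact Or.inl h1
          · right
            constructor
            · omega
            · have := hb.2 (by omega)
              omega
        refine List.pairwise_cons.mpr ⟨?_, ih hys⟩
        intro z hz
        have hz' : z = x ∨ z ∈ ys := by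
          have := PySem.List.mem_insertBy
            (before := fun a b => decide (a.1 < b.1) || !decide (b.1 < a.1) && decide (a.2 < b.2))
            (x := x) (ys := ys) (y := z)
          exact this.mp hz
        rcases hz' with rfl | hz'
        · exact hyx
        · exact hy z hz'
  show (List.foldl (fun acc x => PySem.List.insertBy _ x acc) [] xs).Pairwise pvLexLe
  have : ∀ (acc : List (Int × Int)), acc.Pairwise pvLexLe →
      (List.foldl (fun acc x => PySem.List.insertBy
        (fun a b => decide (a.1 < b.1) || !decide (b.1 < a.1) && decide (a.2 < b.2)) x acc) acc xs).Pairwise pvLexLe := by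
    induction xs with
    | nil => intro acc h; exact h
    | cons x xs ih => intro acc h; exact ih _ (hins x acc h)
  exact this [] (List.Pairwise.nil)

theorem pvSorted2_eq_of_perm (xs ys : List (Int × Int)) (h : xs.Perm ys) :
    PySem.List.sorted2 xs (fun o => o.1) (fun o => o.2) false
      = PySem.List.sorted2 ys (fun o => o.1) (fun o => o.2) false := by
  have hperm : (PySem.List.sorted2 xs (fun o => o.1) (fun o => o.2) false).Perm
      (PySem.List.sorted2 ys (fun o => o.1) (fun o => o.2) false) :=
    (PySem.List.sorted2_perm xs _ _ _).trans (h.trans (PySem.List.sorted2_perm ys _ _ _).symm)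
  refine List.Perm.eq_of_pairwise ?_ (pvSorted2_pairwise xs) (pvSorted2_pairwise ys) hperm
  intro a b _ _ hab hba
  unfold pvLexLe at hab hba
  have : a.1 = b.1 ∧ a.2 = b.2 := by omega
  exact Prod.ext this.1 this.2

-- ---------- per-island packaging ----------

-- visited facts of one replay run from the seed
theorem pvReplayVis (S : PySem.Set (Int × Int)) (cap : Nat) (hS : pvGood S cap) (f : Nat)
    (hf : cap + 1 ≤ f) :
    (∀ o ∈ (pvReplay S f [(0, 0)] PySem.Set.empty []).2, o ∈ S) ∧
    (∀ o ∈ S, o = (0, 0) ∨ o ∈ (pvReplay S f [(0, 0)] PySem.Set.empty []).2) := by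
  obtain ⟨hnd, horig, hlen, hconn⟩ := hS
  have hfin := pvReplay_final S hnd f [(0, 0)] PySem.Set.empty []
    (by intro o ho; simp at ho; exact ho ▸ horig)
    (by intro o ho; simp at ho; exact Or.inl ho)
    (by intro o ho; simp [PySem.Set.empty] at ho)
    (List.nodup_nil)
    (by intro o; simp [PySem.Set.empty])
    (by
      intro x hx hxq d hd hS'
      rcases hx with h | h
      · exact absurd (by simp [h]) hxq
      · simp [PySem.Set.empty] at h)
    (by simp [PySem.Set.empty]; omega)
  obtain ⟨hpatvis, hvisS, hclo⟩ := hfin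
  refine ⟨hvisS, ?_⟩
  intro o hoS
  have hpath := hconn o hoS
  clear hoS
  induction hpath with
  | refl => exact Or.inl rfl
  | tail hpq hstep ih =>
    rename_i p q
    obtain ⟨hpS, hqS, hdS⟩ := hstep
    right
    have hq' : (p.1 + (q.1 - p.1, q.2 - p.2).1, p.2 + (q.1 - p.1, q.2 - p.2).2) = q := by
      obtain ⟨q1, q2⟩ := q; simp only [Prod.mk.injEq]; omega
    have hres := hclo p ih (q.1 - p.1, q.2 - p.2) hdS (by rw [hq']; exact hqS)
    rwa [hq'] at hres

-- the island's offset set built from the region, with all its Good properties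
theorem pvGood_of_region (rows cols : Int) (grid : List (List Int)) (si sj : Int)
    (hseed : pvLand rows cols grid (si, sj)) (cap : Nat)
    (hcap : ∀ (l : List (Int × Int)), l.Nodup → (∀ x ∈ l, pvLand rows cols grid x) → l.length ≤ cap)
    (region : PySem.Set (Int × Int)) (hnd : region.Nodup)
    (hmem : ∀ x, x ∈ region ↔ pvConn rows cols grid (si, sj) x) :
    (region.map (fun p => (p.1 - si, p.2 - sj))).Nodup ∧
    (∀ o, o ∈ region.map (fun p => (p.1 - si, p.2 - sj)) ↔
      pvConn rows cols grid (si, sj) (pvShift si sj o)) ∧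
    pvGood (region.map (fun p => (p.1 - si, p.2 - sj))) cap := by
  have hinj : Function.Injective (fun p : Int × Int => (p.1 - si, p.2 - sj)) := by
    intro p q h
    obtain ⟨p1, p2⟩ := p; obtain ⟨q1, q2⟩ := q
    simp only [Prod.mk.injEq] at h ⊢
    omega
  have hndS : (region.map (fun p => (p.1 - si, p.2 - sj))).Nodup := hnd.map hinj
  have hSmem : ∀ o, o ∈ region.map (fun p => (p.1 - si, p.2 - sj)) ↔
      pvConn rows cols grid (si, sj) (pvShift si sj o) := by
    intro o
    rw [List.mem_map]
    constructor
    · rintro ⟨p, hp, rfl⟩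
      have : pvShift si sj (p.1 - si, p.2 - sj) = p := by
        obtain ⟨p1, p2⟩ := p; simp only [pvShift, Prod.mk.injEq]; omega
      rw [this]
      exact (hmem p).mp hp
    · intro hc
      refine ⟨pvShift si sj o, (hmem _).mpr hc, ?_⟩
      obtain ⟨o1, o2⟩ := o
      simp only [pvShift, Prod.mk.injEq]
      omega
  refine ⟨hndS, hSmem, hndS, ?_, ?_, ?_⟩
  · rw [hSmem]
    have : pvShift si sj (0, 0) = (si, sj) := by simp [pvShift]
    rw [this]
    exact Relation.ReflTransGen.refl
  · have hland : ∀ x ∈ region.map (fun p => (p.1 - si, p.2 - sj)), True := fun _ _ => trivial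
    have : (region.map (fun p => (p.1 - si, p.2 - sj))).length = region.length := by simp
    rw [this]
    exact hcap region hnd (fun x hx => pvConn_land rows cols grid _ _ hseed ((hmem x).mp hx))
  · -- transport connectivity to offset space
    intro o hoS
    have hgen : ∀ x, pvConn rows cols grid (si, sj) x →
        Relation.ReflTransGen (pvStepS (region.map (fun p => (p.1 - si, p.2 - sj)))) (0, 0)
          (x.1 - si, x.2 - sj) := by
      intro x hx
      induction hx with
      | refl => simpa using Relation.ReflTransGen.refl
      | tail hpq hstep ih =>
        rename_i p q
        refine Relation.ReflTransGen.tail ih ?_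
        refine ⟨?_, ?_, ?_⟩
        · rw [hSmem]
          have : pvShift si sj (p.1 - si, p.2 - sj) = p := by
            obtain ⟨p1, p2⟩ := p; simp only [pvShift, Prod.mk.injEq]; omega
          rw [this]
          exact hpq
        · rw [hSmem]
          have : pvShift si sj (q.1 - si, q.2 - sj) = q := by
            obtain ⟨q1, q2⟩ := q; simp only [pvShift, Prod.mk.injEq]; omega
          rw [this]
          exact Relation.ReflTransGen.tail hpq hstep
        · obtain ⟨_, _, hd⟩ := hstep
          have : ((q.1 - si) - (p.1 - si), (q.2 - sj) - (p.2 - sj)) = (q.1 - p.1, q.2 - p.2) := by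
            simp only [Prod.mk.injEq]; constructor <;> ring
          simpa [this] using hd
    have hc := (hSmem o).mp hoS
    have := hgen (pvShift si sj o) hc
    obtain ⟨o1, o2⟩ := o
    simpa [pvShift] using this

-- the two signatures of Good sets are equal exactly together
theorem pvSigCanon_iff (cap f : Nat) (hf : cap + 1 ≤ f) (Sa Sb : PySem.Set (Int × Int))
    (ha : pvGood Sa cap) (hb : pvGood Sb cap) :
    pvSig Sa f = pvSig Sb f ↔
      PySem.List.sorted2 Sa (fun o => o.1) (fun o => o.2) false
        = PySem.List.sorted2 Sb (fun o => o.1) (fun o => o.2) false := by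
  constructor
  · intro h
    have hmem : ∀ o, o ∈ Sa ↔ o ∈ Sb := by
      intro o
      rw [← pvSig_mem Sa cap ha f hf o, ← pvSig_mem Sb cap hb f hf o, h]
    exact pvSorted2_eq_of_perm Sa Sb ((List.perm_ext_iff_of_nodup ha.1 hb.1).mpr hmem)
  · intro h
    have hperm : Sa.Perm Sb :=
      ((PySem.List.sorted2_perm Sa _ _ _).symm.trans (h ▸ PySem.List.sorted2_perm Sb _ _ _))
    have hmem : ∀ o, o ∈ Sa ↔ o ∈ Sb := fun o => hperm.mem_iff
    unfold pvSig
    rw [pvReplay_congr Sa Sb hmem]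

-- adding compatible elements preserves equal cardinality
theorem pvAddLen {β γ : Type} [BEq β] [LawfulBEq β] [BEq γ] [LawfulBEq γ]
    (s : PySem.Set β) (t : PySem.Set γ) (x : β) (y : γ)
    (hlen : s.length = t.length) (hmem : x ∈ s ↔ y ∈ t) :
    (PySem.Set.add s x).length = (PySem.Set.add t y).length := by
  by_cases hx : x ∈ s
  · have hy : y ∈ t := hmem.mp hx
    simp only [PySem.Set.add]
    rw [if_pos (by rw [pvContains_eq]; simpa using hx),
        if_pos (by rw [pvContains_eq]; simpa using hy)]
    exact hlen
  · have hy : y ∉ t := fun h => hx (hmem.mpr h)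
    simp only [PySem.Set.add]
    rw [if_neg (by rw [pvContains_eq]; simpa using hx),
        if_neg (by rw [pvContains_eq]; simpa using hy)]
    simp [hlen]

-- a nested fold over two ranges is a flat fold over the list of index pairs
theorem pvNestedFold {α : Type} (F : α → Int × Int → α) :
    ∀ (outer : List Int) (inner : List Int) (init : α),
      outer.foldl (fun st i => inner.foldl (fun st j => F st (i, j)) st) init
        = (outer.flatMap (fun i => inner.map (fun j => (i, j)))).foldl F init := by
  intro outer inner
  induction outer with
  | nil => intro init; rfl
  | cons i outer ih =>
    intro init
    simp only [List.foldl_cons, List.flatMap_cons, List.foldl_append, List.foldl_map]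
    exact ih _

-- the flat index list is duplicate-free
theorem pvIdxNodup (rows cols : Int) :
    ((PySem.List.pyRange 0 rows 1).flatMap
      (fun i => (PySem.List.pyRange 0 cols 1).map (fun j => (i, j)))).Nodup := by
  have ha : ∀ (b : Int), (PySem.List.pyRange 0 b 1).Nodup := by
    intro b
    rw [PySem.List.pyRange_one]
    exact List.nodup_range.map (fun x y h => by omega)
  rw [List.nodup_flatMap]
  constructor
  · intro i _
    refine List.Nodup.map ?_ (ha cols)
    intro a b h
    simpa using congrArg Prod.snd h
  · refine (ha rows).imp ?_
    intro a b hab x hx hx'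
    simp only [List.mem_map] at hx hx'
    obtain ⟨j1, _, h1⟩ := hx
    obtain ⟨j2, _, h2⟩ := hx'
    apply hab
    have := h1.trans h2.symm
    simpa using congrArg Prod.fst this

-- appending one element to a set built from a list
theorem pvOfList_snoc {β : Type} [BEq β] (xs : List β) (x : β) :
    PySem.Set.ofList (xs ++ [x]) = PySem.Set.add (PySem.Set.ofList xs) x := by
  simp [PySem.Set.ofList, List.foldl_append]

-- the loop bodies of the two ports, as functions of the index pair (proof-side names)
def pvStepOutA (rows cols : Int) (grid : List (List Int)) (fuel : Nat)
    (st : PySem.Set (Int × Int) × PySem.Set (List (Int × Int))) (p : Int × Int) :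
    PySem.Set (Int × Int) × PySem.Set (List (Int × Int)) :=
  if PySem.Set.contains st.1 p = false ∧ pvCell grid p.1 p.2 = 1 then
    ((pvBfsA rows cols grid p.1 p.2 fuel [p] st.1 []).2,
     PySem.Set.add st.2 (pvBfsA rows cols grid p.1 p.2 fuel [p] st.1 []).1)
  else st

def pvStepOutB (rows cols : Int) (grid : List (List Int)) (fuel : Nat)
    (st : PySem.Set (Int × Int) × PySem.Set (List (Int × Int))) (p : Int × Int) :
    PySem.Set (Int × Int) × PySem.Set (List (Int × Int)) :=
  if PySem.Set.contains st.1 p = false ∧ pvCell grid p.1 p.2 = 1 then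
    (PySem.Set.union st.1 (pvRegion rows cols grid fuel (PySem.Set.add PySem.Set.empty p)),
     PySem.Set.add st.2 (pvCanon p.1 p.2 (pvRegion rows cols grid fuel (PySem.Set.add PySem.Set.empty p))))
  else st

-- the lockstep run of both outer loops
theorem pvOuter (rows cols : Int) (grid : List (List Int)) (fuel cap : Nat)
    (hfuel : fuel = cap + 1)
    (hcap : ∀ (l : List (Int × Int)), l.Nodup → (∀ x ∈ l, pvLand rows cols grid x) → l.length ≤ cap) :
    ∀ (idx : List (Int × Int)),
      idx.Nodup →
      (∀ p ∈ idx, 0 ≤ p.1 ∧ p.1 < rows ∧ 0 ≤ p.2 ∧ p.2 < cols) →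
      ∀ (visA seenB : PySem.Set (Int × Int)) (patsA shapesB : PySem.Set (List (Int × Int)))
        (Sing : List (Int × Int)) (L : List (PySem.Set (Int × Int))),
      (∀ s ∈ Sing, s ∉ idx) →
      (∀ x, x ∈ seenB ↔ (x ∈ visA ∨ x ∈ Sing)) →
      (∀ x ∈ visA, ∀ y, pvConn rows cols grid x y → y ∈ seenB) →
      (∀ S ∈ L, pvGood S cap) →
      patsA = PySem.Set.ofList (L.map (fun S => pvSig S fuel)) →
      shapesB = PySem.Set.ofList (L.map (fun S =>
        PySem.List.sorted2 S (fun o => o.1) (fun o => o.2) false)) →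
      patsA.length = shapesB.length →
      ((idx.foldl (pvStepOutA rows cols grid fuel) (visA, patsA)).2).length
        = ((idx.foldl (pvStepOutB rows cols grid fuel) (seenB, shapesB)).2).length := by
  intro idx
  induction idx with
  | nil =>
    intro _ _ visA seenB patsA shapesB Sing L _ _ _ _ _ _ hlen
    exact hlen
  | cons p tail ih =>
    intro hnd hbounds visA seenB patsA shapesB Sing L hSingIdx hcorr hclosed hGoodL hA hB hlen
    obtain ⟨i, j⟩ := p
    have hpidx : ((i, j) : Int × Int) ∉ Sing := fun h => hSingIdx _ h (by simp)
    have hcont : PySem.Set.contains seenB (i, j) = PySem.Set.contains visA (i, j) := by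
      rw [pvContains_eq, pvContains_eq]
      by_cases h : ((i, j) : Int × Int) ∈ visA
      · simp [h, (hcorr (i, j)).mpr (Or.inl h)]
      · have : ((i, j) : Int × Int) ∉ seenB := by
          intro hmem
          rcases (hcorr (i, j)).mp hmem with h' | h'
          · exact h h'
          · exact hpidx h'
        simp [h, this]
    simp only [List.foldl_cons]
    by_cases hg : PySem.Set.contains visA (i, j) = false ∧ pvCell grid i j = 1
    case neg =>
      have hgB : ¬ (PySem.Set.contains seenB (i, j) = false ∧ pvCell grid i j = 1) := by
        rw [hcont]; exact hg
      rw [show pvStepOutA rows cols grid fuel (visA, patsA) (i, j) = (visA, patsA) by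
          rw [pvStepOutA]; exact if_neg hg,
        show pvStepOutB rows cols grid fuel (seenB, shapesB) (i, j) = (seenB, shapesB) by
          rw [pvStepOutB]; exact if_neg hgB]
      exact ih (hnd.of_cons) (fun q hq => hbounds q (by simp [hq])) visA seenB patsA shapesB Sing L
        (fun s hs hmem => hSingIdx s hs (by simp [hmem])) hcorr hclosed hGoodL hA hB hlen
    case pos =>
      have hgB : PySem.Set.contains seenB (i, j) = false ∧ pvCell grid i j = 1 := by
        rw [hcont]; exact hg
      have hseedland : pvLand rows cols grid (i, j) := by
        obtain ⟨h1, h2, h3, h4⟩ := hbounds (i, j) (by simp)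
        exact ⟨h1, h2, h3, h4, hg.2⟩
      have hAnot : ((i, j) : Int × Int) ∉ visA := by
        have := hg.1
        rw [pvContains_eq, decide_eq_false_iff_not] at this
        exact this
      -- previously visited cells are not connected to the new seed
      have hv0 : ∀ x ∈ visA, ¬ pvConn rows cols grid (i, j) x := by
        intro x hx hcx
        have hseen : ((i, j) : Int × Int) ∈ seenB :=
          hclosed x hx (i, j) (pvConn_symm rows cols grid _ _ hcx)
        rcases (hcorr (i, j)).mp hseen with h | h
        · exact hAnot h
        · exact hpidx h
      -- the island region computed by B
      have hinit : PySem.Set.add PySem.Set.empty ((i, j) : Int × Int) = [(i, j)] := rfl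
      obtain ⟨hRegNd, hRegMem⟩ := pvRegion_spec rows cols grid i j hseedland cap hcap fuel
        (PySem.Set.add PySem.Set.empty (i, j))
        (by rw [hinit]; exact List.nodup_singleton _)
        (by
          rw [hinit]
          intro x hx
          simp at hx
          exact hx ▸ Relation.ReflTransGen.refl)
        (by rw [hinit]; simp)
        (by rw [hinit]; simp; omega)
      obtain ⟨hndS, hSmem, hGoodS⟩ := pvGood_of_region rows cols grid i j hseedland cap hcap
        (pvRegion rows cols grid fuel (PySem.Set.add PySem.Set.empty (i, j))) hRegNd hRegMem
      -- notation
      set region := pvRegion rows cols grid fuel (PySem.Set.add PySem.Set.empty (i, j)) with hregion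
      set Snew := region.map (fun p => (p.1 - i, p.2 - j)) with hSnew
      -- A's island run is the abstract replay on Snew
      have hbisim := pvBfsA_eq_replay rows cols grid i j Snew visA hseedland hSmem hv0 fuel
        [(0, 0)] PySem.Set.empty []
        (by intro o ho; simp at ho; exact ho ▸ hGoodS.2.1)
        (by intro o ho; simp [PySem.Set.empty] at ho)
      have hmapq : ([((0 : Int), (0 : Int))].map (pvShift i j)) = [((i : Int), (j : Int))] := by
        simp [pvShift]
      rw [hmapq] at hbisim
      have hnilvis : visA ++ (PySem.Set.empty : PySem.Set (Int × Int)).map (pvShift i j) = visA := by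
        simp [PySem.Set.empty]
      rw [hnilvis] at hbisim
      have hstepA : pvStepOutA rows cols grid fuel (visA, patsA) (i, j)
          = (visA ++ ((pvReplay Snew fuel [(0, 0)] PySem.Set.empty []).2).map (pvShift i j),
             PySem.Set.add patsA (pvSig Snew fuel)) := by
        rw [pvStepOutA]
        rw [if_pos hg]
        simp only [hbisim]
        rfl
      have hstepB : pvStepOutB rows cols grid fuel (seenB, shapesB) (i, j)
          = (PySem.Set.union seenB region,
             PySem.Set.add shapesB (PySem.List.sorted2 Snew (fun o => o.1) (fun o => o.2) false)) := by
        rw [pvStepOutB]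
        rw [if_pos hgB]
        rfl
      rw [hstepA, hstepB]
      -- facts about the replay's visited cells
      obtain ⟨hRVsub, hRVcov⟩ := pvReplayVis Snew cap hGoodS fuel (by omega)
      set RV := (pvReplay Snew fuel [(0, 0)] PySem.Set.empty []).2 with hRV
      have hshiftRV : ∀ x, x ∈ RV.map (pvShift i j) → x ∈ region := by
        intro x hx
        obtain ⟨o, ho, rfl⟩ := List.mem_map.mp hx
        exact (hRegMem _).mpr ((hSmem o).mp (hRVsub o ho))
      have hregion_seen : ∀ x ∈ region, x ∈ PySem.Set.union seenB region :=
        fun x hx => (PySem.Set.mem_union _ _ _).mpr (Or.inr hx)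
      -- new membership correspondence with Sing ∪ {seed}
      have hcorr' : ∀ x, x ∈ PySem.Set.union seenB region ↔
          (x ∈ visA ++ RV.map (pvShift i j) ∨ x ∈ Sing ++ [(i, j)]) := by
        intro x
        rw [PySem.Set.mem_union, List.mem_append, List.mem_append]
        constructor
        · rintro (h | h)
          · rcases (hcorr x).mp h with h' | h'
            · exact Or.inl (Or.inl h')
            · exact Or.inr (Or.inl h')
          · -- x in the region: seed goes to Sing', the rest is A-visited
            have hox := (hRegMem x).mp h
            have hSx : (x.1 - i, x.2 - j) ∈ Snew := by
              rw [hSmem]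
              have : pvShift i j (x.1 - i, x.2 - j) = x := by
                obtain ⟨x1, x2⟩ := x; simp only [pvShift, Prod.mk.injEq]; omega
              rw [this]; exact hox
            rcases hRVcov _ hSx with h0 | hRVx
            · right; right
              have : x = (i, j) := by
                obtain ⟨x1, x2⟩ := x
                simp only [Prod.mk.injEq] at h0 ⊢
                omega
              simp [this]
            · left; right
              refine List.mem_map.mpr ⟨(x.1 - i, x.2 - j), hRVx, ?_⟩
              obtain ⟨x1, x2⟩ := x; simp only [pvShift, Prod.mk.injEq]; omega
        · rintro ((h | h) | (h | h))
          · exact Or.inl ((hcorr x).mpr (Or.inl h))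
          · exact Or.inr (hshiftRV x h)
          · exact Or.inl ((hcorr x).mpr (Or.inr h))
          · simp at h
            exact Or.inr (h ▸ (hRegMem (i, j)).mpr Relation.ReflTransGen.refl)
      -- closedness of the new A-visited set
      have hclosed' : ∀ x ∈ visA ++ RV.map (pvShift i j), ∀ y,
          pvConn rows cols grid x y → y ∈ PySem.Set.union seenB region := by
        intro x hx y hxy
        rcases List.mem_append.mp hx with h | h
        · exact (PySem.Set.mem_union _ _ _).mpr (Or.inl (hclosed x h y hxy))
        · have hxr : x ∈ region := hshiftRV x h
          have hcx : pvConn rows cols grid (i, j) x := (hRegMem x).mp hxr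
          have hcy : pvConn rows cols grid (i, j) y := Relation.ReflTransGen.trans hcx hxy
          exact hregion_seen y ((hRegMem y).mpr hcy)
      -- the two new signatures are present together
      have hsigmem : pvSig Snew fuel ∈ patsA ↔
          PySem.List.sorted2 Snew (fun o => o.1) (fun o => o.2) false ∈ shapesB := by
        rw [hA, hB, PySem.Set.mem_ofList, PySem.Set.mem_ofList, List.mem_map, List.mem_map]
        constructor
        · rintro ⟨S, hSL, he⟩
          exact ⟨S, hSL, (pvSigCanon_iff cap fuel (by omega) S Snew (hGoodL S hSL) hGoodS).mp he⟩
        · rintro ⟨S, hSL, he⟩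
          exact ⟨S, hSL, (pvSigCanon_iff cap fuel (by omega) S Snew (hGoodL S hSL) hGoodS).mpr he⟩
      refine ih (hnd.of_cons) (fun q hq => hbounds q (by simp [hq]))
        (visA ++ RV.map (pvShift i j)) (PySem.Set.union seenB region)
        (PySem.Set.add patsA (pvSig Snew fuel))
        (PySem.Set.add shapesB (PySem.List.sorted2 Snew (fun o => o.1) (fun o => o.2) false))
        (Sing ++ [(i, j)]) (L ++ [Snew]) ?_ hcorr' hclosed' ?_ ?_ ?_ ?_
      · intro s hs hmem
        rcases List.mem_append.mp hs with h | h
        · exact hSingIdx s h (by simp [hmem])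
        · simp at h
          subst h
          exact (List.nodup_cons.mp hnd).1 hmem
      · intro S hS
        rcases List.mem_append.mp hS with h | h
        · exact hGoodL S h
        · simp at h
          exact h ▸ hGoodS
      · rw [hA, List.map_append, List.map_cons, List.map_nil, pvOfList_snoc]
      · rw [hB, List.map_append, List.map_cons, List.map_nil, pvOfList_snoc]
      · exact pvAddLen patsA shapesB _ _ hlen hsigmem

-- the flat index list both outer loops sweep
def pvIdx (rows cols : Int) : List (Int × Int) :=
  (PySem.List.pyRange 0 rows 1).flatMap
    (fun i => (PySem.List.pyRange 0 cols 1).map (fun j => (i, j)))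

theorem pvPortA_flat (grid : List (List Int)) :
    number_of_distinct_icelands grid = PySem.Set.len
      ((pvIdx (PySem.List.len grid) (PySem.List.len ((PySem.List.pyGet? grid 0).getD []))).foldl
        (pvStepOutA (PySem.List.len grid) (PySem.List.len ((PySem.List.pyGet? grid 0).getD []))
          grid (grid.length * ((PySem.List.pyGet? grid 0).getD []).length + 1))
        (PySem.Set.empty, PySem.Set.empty)).2 :=
  congrArg (fun res : PySem.Set (Int × Int) × PySem.Set (List (Int × Int)) => PySem.Set.len res.2)
    (pvNestedFold
      (pvStepOutA (PySem.List.len grid) (PySem.List.len ((PySem.List.pyGet? grid 0).getD []))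
        grid (grid.length * ((PySem.List.pyGet? grid 0).getD []).length + 1))
      (PySem.List.pyRange 0 (PySem.List.len grid) 1)
      (PySem.List.pyRange 0 (PySem.List.len ((PySem.List.pyGet? grid 0).getD [])) 1)
      (PySem.Set.empty, PySem.Set.empty))

theorem pvPortB_flat (grid : List (List Int)) :
    number_of_distinct_icelands_alt grid = PySem.Set.len
      ((pvIdx (PySem.List.len grid) (PySem.List.len ((PySem.List.pyGet? grid 0).getD []))).foldl
        (pvStepOutB (PySem.List.len grid) (PySem.List.len ((PySem.List.pyGet? grid 0).getD []))
          grid (grid.length * ((PySem.List.pyGet? grid 0).getD []).length + 1))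
        (PySem.Set.empty, PySem.Set.empty)).2 :=
  congrArg (fun res : PySem.Set (Int × Int) × PySem.Set (List (Int × Int)) => PySem.Set.len res.2)
    (pvNestedFold
      (pvStepOutB (PySem.List.len grid) (PySem.List.len ((PySem.List.pyGet? grid 0).getD []))
        grid (grid.length * ((PySem.List.pyGet? grid 0).getD []).length + 1))
      (PySem.List.pyRange 0 (PySem.List.len grid) 1)
      (PySem.List.pyRange 0 (PySem.List.len ((PySem.List.pyGet? grid 0).getD [])) 1)
      (PySem.Set.empty, PySem.Set.empty))

-- ===== VERDICT (by name: the statement is the Claim_ definition above) =====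
theorem number_of_distinct_icelands_spec : Claim_equal_number_of_distinct_icelands := by
  intro grid _ _
  unfold Spec_number_of_distinct_icelands
  rw [pvPortA_flat, pvPortB_flat]
  unfold PySem.Set.len
  congr 1
  refine pvOuter (PySem.List.len grid) (PySem.List.len ((PySem.List.pyGet? grid 0).getD []))
    grid (grid.length * ((PySem.List.pyGet? grid 0).getD []).length + 1)
    (grid.length * ((PySem.List.pyGet? grid 0).getD []).length) rfl ?_
    (pvIdx (PySem.List.len grid) (PySem.List.len ((PySem.List.pyGet? grid 0).getD [])))
    ?_ ?_ PySem.Set.empty PySem.Set.empty PySem.Set.empty PySem.Set.empty [] []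
    ?_ ?_ ?_ ?_ rfl rfl rfl
  · intro l hnd hland
    have := pvLand_card (PySem.List.len grid) (PySem.List.len ((PySem.List.pyGet? grid 0).getD []))
      grid l hnd hland
    simpa [PySem.List.len_eq] using this
  · exact pvIdxNodup _ _
  · intro p hp
    unfold pvIdx at hp
    simp only [List.mem_flatMap, List.mem_map] at hp
    obtain ⟨i, hi, j, hj, rfl⟩ := hp
    rw [PySem.List.mem_pyRange_one] at hi hj
    exact ⟨hi.1, hi.2, hj.1, hj.2⟩
  · intro s hs
    simp at hs
  · intro x
    simp [PySem.Set.empty]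
  · intro x hx
    simp [PySem.Set.empty] at hx
  · intro S hS
    simp at hS
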